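-- pv_equiv track=rewrite | github.com/tsinghua-fib-lab/RoadBench | bev_lane_designations.py | convert_lane_designations_to_abcd
-- ===== SOURCE A (Python) =====
-- def convert_lane_designations_to_abcd(lane_designations):
--     """
--     将车道导向种类转换为ABCD格式
--
--     Args:
--         lane_designations: 车道导向种类列表，每个元素是一个车道的导向种类列表
--
--     Returns:
--         转换后的ABCD格式列表，每个元素是一个车道的ABCD字符串
--     """
--     direction_map = {
--         "u-turn": "A",
--         "left-turn": "B",
--         "straight": "C",
--         "right-turn": "D",
--     }
--
--     result = []
--     for lane_directions in lane_designations: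
--         abcd_chars = []
--         for direction in lane_directions:
--             if isinstance(direction, str) and direction.lower() in direction_map:
--                 abcd_chars.append(direction_map[direction.lower()])
--         result.append("".join(sorted(abcd_chars)))  # 排序保证一致性
--
--     return result
-- ===== SOURCE B (Python) =====
-- def convert_lane_designations_to_abcd(lane_designations):
--     direction_map = {
--         "u-turn": "A",
--         "left-turn": "B",
--         "straight": "C",
--         "right-turn": "D",
--     }
--     order = ["u-turn", "left-turn", "straight", "right-turn"]
--
--     result = []
--     for lane_directions in lane_designations:
--         counts = {}
--         for direction in lane_directions:
--             if isinstance(direction, str):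
--                 low = direction.lower()
--                 if low in direction_map:
--                     counts[low] = counts.get(low, 0) + 1
--         parts = []
--         for k in order:
--             parts.append(direction_map[k] * counts.get(k, 0))
--         result.append("".join(parts))
--     return result
-- ===== Notes on version B (the rewrite author's own statement) =====
-- stated objective: alternative
-- what changed: Per lane, instead of collecting mapped letters and sorting them, B counts the valid lowercased directions in a dict and emits the letters in the fixed canonical u-turn/left-turn/straight/right-turn order via string repetition, so no sort is performed.
import Mathlib
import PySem

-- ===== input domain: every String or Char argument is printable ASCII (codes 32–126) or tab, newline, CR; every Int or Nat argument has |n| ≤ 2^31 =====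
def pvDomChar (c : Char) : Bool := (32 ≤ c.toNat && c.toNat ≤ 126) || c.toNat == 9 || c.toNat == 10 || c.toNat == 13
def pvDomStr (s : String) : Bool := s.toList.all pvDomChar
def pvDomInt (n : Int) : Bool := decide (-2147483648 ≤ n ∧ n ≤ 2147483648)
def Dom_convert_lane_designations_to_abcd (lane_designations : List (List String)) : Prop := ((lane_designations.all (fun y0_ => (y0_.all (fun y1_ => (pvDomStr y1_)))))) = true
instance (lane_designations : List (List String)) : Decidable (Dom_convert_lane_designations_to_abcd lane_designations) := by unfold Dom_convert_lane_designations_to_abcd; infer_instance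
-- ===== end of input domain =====

-- B replaces A's per-lane collect-then-sort by a counting pass that emits the characters
-- already in canonical A-D order (objective: alternative; the return value is proved equal).


-- ===== PORT A =====
def pvDmapA : PySem.Dict String String :=
  PySem.Dict.ofList [("u-turn", "A"), ("left-turn", "B"), ("straight", "C"), ("right-turn", "D")]

-- 'isinstance(direction, str)' is always true under the type convention (elements are String).
-- 'direction_map[direction.lower()]' is guarded by the 'in' check, so getD "" is exact here.
def convert_lane_designations_to_abcd (lane_designations : List (List String)) : List String :=
  lane_designations.foldl (fun result lane_directions =>
    let abcd_chars := lane_directions.foldl (fun acc direction =>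
      if pvDmapA.contains (PySem.Str.lower direction) then
        acc ++ [pvDmapA.getD (PySem.Str.lower direction) ""]
      else acc) []
    result ++ [PySem.Str.join "" (PySem.List.sorted abcd_chars (fun x => x) false)]) []

-- ===== PORT B =====
def pvDmapB : PySem.Dict String String :=
  PySem.Dict.ofList [("u-turn", "A"), ("left-turn", "B"), ("straight", "C"), ("right-turn", "D")]

def pvOrderB : List String := ["u-turn", "left-turn", "straight", "right-turn"]

-- Python string repetition s * n, ported via PySem.List.pyRepeat on the code points (exact).
def pvStrMul (s : String) (n : Int) : String := String.ofList (PySem.List.pyRepeat s.toList n)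

def convert_lane_designations_to_abcd_alt (lane_designations : List (List String)) : List String :=
  lane_designations.foldl (fun result lane_directions =>
    let counts := lane_directions.foldl (fun counts direction =>
      let low := PySem.Str.lower direction
      if pvDmapB.contains low then counts.insert low (counts.getD low 0 + 1) else counts)
      (PySem.Dict.empty : PySem.Dict String Int)
    let parts := pvOrderB.foldl (fun parts k =>
      parts ++ [pvStrMul (pvDmapB.getD k "") (counts.getD k 0)]) []
    result ++ [PySem.Str.join "" parts]) []

-- ===== PRECONDITION & SPEC =====
def Spec_convert_lane_designations_to_abcd (lane_designations : List (List String)) (out : List String) : Prop := out = convert_lane_designations_to_abcd_alt lane_designations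
instance (lane_designations : List (List String)) (out : List String) : Decidable (Spec_convert_lane_designations_to_abcd lane_designations out) := by unfold Spec_convert_lane_designations_to_abcd; infer_instance

-- ===== CLAIM (what is proved, stated in full; the proofs are below) =====
def Claim_equal_convert_lane_designations_to_abcd : Prop := ∀ (lane_designations : List (List String)), Dom_convert_lane_designations_to_abcd lane_designations → Spec_convert_lane_designations_to_abcd lane_designations (convert_lane_designations_to_abcd lane_designations)

-- ===== LEMMAS AND PROOFS =====

-- A's per-lane collected list, in filter/map form.
def pvAbcd (lane : List String) : List String :=
  (lane.filter (fun d => pvDmapA.contains (PySem.Str.lower d))).map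
    (fun d => pvDmapA.getD (PySem.Str.lower d) "")

-- multiplicity of key k among the lowered directions of a lane
def pvCnt (lane : List String) (k : String) : Nat := (lane.map PySem.Str.lower).count k

-- the canonical sorted block form  A^cu ++ B^cl ++ C^cs ++ D^cr
def pvCanon (lane : List String) : List String :=
  List.replicate (pvCnt lane "u-turn") "A" ++ (List.replicate (pvCnt lane "left-turn") "B" ++
  (List.replicate (pvCnt lane "straight") "C" ++ List.replicate (pvCnt lane "right-turn") "D"))

lemma pvContains_iff (s : String) : pvDmapA.contains s = true ↔
    (s = "u-turn" ∨ s = "left-turn" ∨ s = "straight" ∨ s = "right-turn") := by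
  have h : pvDmapA = PySem.Dict.mk
      [("u-turn", "A"), ("left-turn", "B"), ("straight", "C"), ("right-turn", "D")] := by decide
  rw [h]
  simp [pysem]
  constructor <;> rintro (rfl | rfl | rfl | rfl) <;> simp

lemma pvAbcd_count (lane : List String) (k v : String)
    (hkv : (k, v) ∈ [("u-turn", "A"), ("left-turn", "B"), ("straight", "C"), ("right-turn", "D")]) :
    (pvAbcd lane).count v = pvCnt lane k := by
  induction lane with
  | nil => fin_cases hkv <;> rfl
  | cons d rest ih =>
    by_cases hc : pvDmapA.contains (PySem.Str.lower d) = true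
    · rcases (pvContains_iff _).mp hc with hs | hs | hs | hs <;>
        fin_cases hkv <;>
        simp_all [pvAbcd, pvCnt, List.count_cons] <;> decide
    · have hs : ¬(PySem.Str.lower d = "u-turn" ∨ PySem.Str.lower d = "left-turn" ∨
          PySem.Str.lower d = "straight" ∨ PySem.Str.lower d = "right-turn") :=
        fun h => hc ((pvContains_iff _).mpr h)
      simp only [not_or] at hs
      obtain ⟨h1, h2, h3, h4⟩ := hs
      fin_cases hkv <;> simp_all [pvAbcd, pvCnt, Bool.not_eq_true]

lemma pvAbcd_count_zero (lane : List String) (v : String)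
    (hv : v ∉ (["A", "B", "C", "D"] : List String)) : (pvAbcd lane).count v = 0 := by
  rw [List.count_eq_zero]
  intro hmem
  apply hv
  simp only [pvAbcd, List.mem_map, List.mem_filter] at hmem
  obtain ⟨d, ⟨_, hc⟩, hval⟩ := hmem
  rcases (pvContains_iff _).mp hc with hs | hs | hs | hs <;>
    rw [hs] at hval <;> rw [← hval] <;> decide

lemma pvCanon_perm (lane : List String) : (pvCanon lane).Perm (pvAbcd lane) := by
  rw [List.perm_iff_count]
  intro v
  by_cases h1 : v = "A"
  · subst h1
    simp [pvCanon, List.count_append, List.count_replicate,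
      pvAbcd_count lane "u-turn" "A" (by simp)]
  · by_cases h2 : v = "B"
    · subst h2
      simp [pvCanon, List.count_append, List.count_replicate,
        pvAbcd_count lane "left-turn" "B" (by simp)]
    · by_cases h3 : v = "C"
      · subst h3
        simp [pvCanon, List.count_append, List.count_replicate,
          pvAbcd_count lane "straight" "C" (by simp)]
      · by_cases h4 : v = "D"
        · subst h4
          simp [pvCanon, List.count_append, List.count_replicate,
            pvAbcd_count lane "right-turn" "D" (by simp)]
        · rw [pvAbcd_count_zero lane v (by simp [h1, h2, h3, h4])]
          simp [pvCanon, List.count_append, List.count_replicate]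
          exact ⟨fun h => absurd h.symm h1, fun h => absurd h.symm h2,
            fun h => absurd h.symm h3, fun h => absurd h.symm h4⟩

lemma pvStrLe (s t : String) (h : s.toList < t.toList) : s ≤ t :=
  le_of_lt (String.lt_iff_toList_lt.mpr h)

lemma pvRepApp (a : String) (m : Nat) (l : List String)
    (hl : List.Pairwise (fun x y => x ≤ y) l) (hal : ∀ x ∈ l, a ≤ x) :
    List.Pairwise (fun x y => x ≤ y) (List.replicate m a ++ l) := by
  apply List.pairwise_append.mpr
  refine ⟨List.pairwise_replicate.mpr (Or.inr le_rfl), hl, ?_⟩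
  intro x hx y hy
  rw [List.eq_of_mem_replicate hx]
  exact hal y hy

lemma pvCanon_pairwise (lane : List String) :
    List.Pairwise (fun a b => a ≤ b) (pvCanon lane) := by
  unfold pvCanon
  refine pvRepApp _ _ _ (pvRepApp _ _ _ (pvRepApp _ _ _
    (List.pairwise_replicate.mpr (Or.inr le_rfl)) ?_) ?_) ?_
  · intro x hx
    rw [List.eq_of_mem_replicate hx]
    exact pvStrLe _ _ (by decide)
  · intro x hx
    simp only [List.mem_append, List.mem_replicate] at hx
    rcases hx with ⟨_, rfl⟩ | ⟨_, rfl⟩ <;> exact pvStrLe _ _ (by decide)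
  · intro x hx
    simp only [List.mem_append, List.mem_replicate] at hx
    rcases hx with ⟨_, rfl⟩ | (⟨_, rfl⟩ | ⟨_, rfl⟩) <;> exact pvStrLe _ _ (by decide)

lemma pvSorted_abcd (lane : List String) :
    PySem.List.sorted (pvAbcd lane) (fun x => x) false = pvCanon lane :=
  PySem.List.sorted_id_eq_of_perm_of_pairwise _ _ (pvCanon_perm lane) (pvCanon_pairwise lane)

lemma pvCounts_getD (lane : List String) (d : PySem.Dict String Int) (k : String)
    (hk : pvDmapB.contains k = true) :
    (lane.foldl (fun counts direction =>
      let low := PySem.Str.lower direction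
      if pvDmapB.contains low then counts.insert low (counts.getD low 0 + 1) else counts) d).getD k 0
      = d.getD k 0 + (pvCnt lane k : Int) := by
  induction lane generalizing d with
  | nil => simp [pvCnt]
  | cons x rest ih =>
    simp only [List.foldl_cons]
    by_cases hc : pvDmapB.contains (PySem.Str.lower x) = true
    · simp only [hc, if_true, ih]
      rw [PySem.Dict.getD_insert]
      by_cases he : k = PySem.Str.lower x
      · rw [if_pos he, he]
        simp [pvCnt]
        ring
      · rw [if_neg he]
        have hne : ¬(PySem.Str.lower x = k) := fun h => he h.symm
        simp [pvCnt, hne]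
    · simp only [Bool.not_eq_true] at hc
      simp only [hc, Bool.false_eq_true, if_false, ih]
      have hne : ¬(PySem.Str.lower x = k) := by
        intro h; rw [h, hk] at hc; exact absurd hc (by decide)
      simp [pvCnt, hne]

lemma pvJoin_nil_eq_flatten (l : List (List Char)) : PySem.Chars.join [] l = l.flatten := by
  induction l with
  | nil => simp [PySem.Chars.join_nil]
  | cons a rest ih =>
    cases rest with
    | nil => simp [PySem.Chars.join_singleton]
    | cons b r => rw [PySem.Chars.join_cons_cons]; simp_all

lemma pvJoin_canon (cu cl cs cr : Nat) :
    PySem.Str.join "" (List.replicate cu "A" ++ (List.replicate cl "B" ++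
      (List.replicate cs "C" ++ List.replicate cr "D"))) =
    PySem.Str.join "" [pvStrMul "A" (0 + (cu : Int)), pvStrMul "B" (0 + (cl : Int)),
      pvStrMul "C" (0 + (cs : Int)), pvStrMul "D" (0 + (cr : Int))] := by
  apply String.toList_inj.mp
  rw [PySem.Str.toList_join, PySem.Str.toList_join]
  have h : ("" : String).toList = [] := rfl
  rw [h, pvJoin_nil_eq_flatten, pvJoin_nil_eq_flatten]
  simp [pvStrMul, PySem.List.pyRepeat_singleton, List.flatten_replicate_singleton]

-- ===== VERDICT (by name: the statement is the Claim_ definition above) =====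
theorem convert_lane_designations_to_abcd_spec : Claim_equal_convert_lane_designations_to_abcd := by
  intro lanes _
  unfold Spec_convert_lane_designations_to_abcd
  unfold convert_lane_designations_to_abcd convert_lane_designations_to_abcd_alt
  rw [PySem.List.foldl_append_singleton_eq_map, PySem.List.foldl_append_singleton_eq_map]
  simp only [List.nil_append]
  apply List.map_congr_left
  intro lane _
  rw [PySem.List.foldl_append_if]
  show PySem.Str.join "" (PySem.List.sorted (pvAbcd lane) (fun x => x) false) = _
  rw [pvSorted_abcd]
  unfold pvCanon
  rw [pvJoin_canon]
  simp only [pvOrderB, List.foldl_cons, List.foldl_nil, List.nil_append]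
  rw [pvCounts_getD lane _ "u-turn" (by decide), pvCounts_getD lane _ "left-turn" (by decide),
    pvCounts_getD lane _ "straight" (by decide), pvCounts_getD lane _ "right-turn" (by decide)]
  simp only [zero_add, PySem.Dict.getD_empty, List.cons_append, List.nil_append]
  rw [show pvDmapB.getD "u-turn" "" = "A" from by decide,
    show pvDmapB.getD "left-turn" "" = "B" from by decide,
    show pvDmapB.getD "straight" "" = "C" from by decide,
    show pvDmapB.getD "right-turn" "" = "D" from by decide]
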